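-- pv_equiv track=rewrite | github.com/Tumaaans/c2013_Sasha | ghuy.py | raise_to
-- ===== SOURCE A (Python) =====
-- def raise_to(num, max_degree):
--     i = 0
--     while True:
--         result = num ** i
--         yield result
--         if result > 100**20:
--             return
--         i += 1
-- ===== SOURCE B (Python) =====
-- def raise_to(num, max_degree):
--     limit = 100 ** 20
--     k = 0
--     while num ** k <= limit:
--         k += 1
--     for i in range(k + 1):
--         yield num ** i
-- ===== Notes on version B (the rewrite author's own statement) =====
-- stated objective: alternative
-- what changed: B works in two separate phases: a first loop only searches for the smallest exponent k whose power exceeds 100**20, then a range-based second pass yields num**i for i in 0..k, instead of A's single interleaved yield/check/increment loop.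
import Mathlib
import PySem

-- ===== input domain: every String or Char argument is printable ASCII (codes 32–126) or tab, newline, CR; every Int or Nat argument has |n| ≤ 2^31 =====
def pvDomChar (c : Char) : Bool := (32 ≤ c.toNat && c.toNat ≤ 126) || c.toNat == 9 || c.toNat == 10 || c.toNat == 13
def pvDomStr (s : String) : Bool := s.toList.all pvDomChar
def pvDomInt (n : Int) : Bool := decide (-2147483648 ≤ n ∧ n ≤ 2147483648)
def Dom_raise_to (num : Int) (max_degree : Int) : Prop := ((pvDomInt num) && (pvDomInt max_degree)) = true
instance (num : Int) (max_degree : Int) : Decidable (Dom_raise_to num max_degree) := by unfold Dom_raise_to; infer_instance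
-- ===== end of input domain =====

-- B splits A's single interleaved generator loop into two phases: find the first exponent k with num**k > 100**20, then emit num**i for i in range(k+1).
-- Python's raise_to is a generator that ignores max_degree and never terminates when |num| <= 1; Pre_ excludes those inputs.


-- ===== PORT A =====
-- the while-True loop, with fuel only to make it total in Lean (on Pre_ inputs the loop
-- terminates within at most 135 iterations, so fuel 200 is never exhausted)
def raiseToGoA (num : Int) (i : Nat) : Nat → List Int
  | 0 => []
  | fuel + 1 =>
    let result := num ^ i
    if result > 100 ^ 20 then [result]
    else result :: raiseToGoA num (i + 1) fuel

def raise_to (num : Int) (max_degree : Int) : List Int := raiseToGoA num 0 200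

-- ===== PORT B =====
-- phase 1: the search loop for the stop exponent (fuel for totality, never exhausted on Pre_)
def findStopB (num : Int) (k : Nat) : Nat → Nat
  | 0 => k
  | fuel + 1 => if num ^ k ≤ 100 ^ 20 then findStopB num (k + 1) fuel else k

-- phase 2: the range comprehension
def raise_to_alt (num : Int) (max_degree : Int) : List Int :=
  (List.range (findStopB num 0 200 + 1)).map (fun i => num ^ i)

-- ===== PRECONDITION & SPEC =====
-- Pre_ excludes |num| ≤ 1, where the Python generator never terminates (num ** i never exceeds 100 ** 20)
def Pre_raise_to (num : Int) (max_degree : Int) : Prop := num ≤ -2 ∨ 2 ≤ num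
instance (num : Int) (max_degree : Int) : Decidable (Pre_raise_to num max_degree) := by unfold Pre_raise_to; infer_instance
def pvWitness_raise_to : Int × Int := (2, 0)

def Spec_raise_to (num : Int) (max_degree : Int) (out : List Int) : Prop := out = raise_to_alt num max_degree
instance (num : Int) (max_degree : Int) (out : List Int) : Decidable (Spec_raise_to num max_degree out) := by unfold Spec_raise_to; infer_instance

-- ===== CLAIM (what is proved, stated in full; the proofs are below) =====
def Claim_equal_raise_to : Prop := ∀ (num : Int) (max_degree : Int), Dom_raise_to num max_degree → Pre_raise_to num max_degree → Spec_raise_to num max_degree (raise_to num max_degree)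

-- ===== LEMMAS AND PROOFS =====

-- a power bound: |num| ≥ 2 gives num ^ 134 > 100 ^ 20 (134 is even, so the sign drops out)
theorem pow134_big (num : Int) (h : num ≤ -2 ∨ 2 ≤ num) : num ^ 134 > 100 ^ 20 := by
  have h4 : (4 : Int) ≤ num ^ 2 := by rcases h with h | h <;> nlinarith
  have : (4 : Int) ^ 67 ≤ (num ^ 2) ^ 67 := pow_le_pow_left₀ (by norm_num) h4 67
  have hb : (100 : Int) ^ 20 < 4 ^ 67 := by norm_num
  calc (100 : Int) ^ 20 < 4 ^ 67 := hb
    _ ≤ (num ^ 2) ^ 67 := this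
    _ = num ^ 134 := by rw [← pow_mul]

-- A's loop, given the first stop exponent s within fuel, produces the powers num^i .. num^s
theorem raiseToGoA_eq (num : Int) (s : Nat)
    (hs : num ^ s > 100 ^ 20) (hmin : ∀ m, m < s → ¬ num ^ m > 100 ^ 20) :
    ∀ (fuel i : Nat), i ≤ s → s < i + fuel →
      raiseToGoA num i fuel = (List.range (s - i + 1)).map (fun j => num ^ (i + j)) := by
  intro fuel
  induction fuel with
  | zero => intro i h1 h2; omega
  | succ fuel ih =>
    intro i h1 h2
    simp only [raiseToGoA]
    by_cases hstop : num ^ i > 100 ^ 20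
    · have hieq : i = s := by
        by_contra hne
        exact hmin i (by omega) hstop
      subst hieq
      rw [if_pos hstop]
      simp
    · have hlt : i < s := by
        rcases Nat.lt_or_ge i s with h | h
        · exact h
        · have : i = s := by omega
          subst this; exact absurd hs hstop
      rw [if_neg hstop, ih (i + 1) (by omega) (by omega)]
      have hn : s - i + 1 = (s - (i + 1) + 1) + 1 := by omega
      rw [hn]
      conv_rhs => rw [List.range_succ_eq_map]
      simp only [List.map_cons, List.map_map, Nat.add_zero]
      refine congrArg (num ^ i :: ·) ?_
      apply List.map_congr_left
      intro j _
      simp [Function.comp]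
      congr 1
      omega

-- B's search loop returns exactly the first stop exponent s, given enough fuel
theorem findStopB_eq (num : Int) (s : Nat)
    (hs : num ^ s > 100 ^ 20) (hmin : ∀ m, m < s → ¬ num ^ m > 100 ^ 20) :
    ∀ (fuel k : Nat), k ≤ s → s ≤ k + fuel → findStopB num k fuel = s := by
  intro fuel
  induction fuel with
  | zero => intro k h1 h2; simp only [findStopB]; omega
  | succ fuel ih =>
    intro k h1 h2
    simp only [findStopB]
    by_cases hk : num ^ k ≤ 100 ^ 20
    · rw [if_pos hk]
      have hne : k ≠ s := by rintro rfl; exact (not_le.mpr hs) hk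
      exact ih (k + 1) (by omega) (by omega)
    · rw [if_neg hk]
      have hks : ¬ k < s := fun h => hmin k h (lt_of_not_ge hk)
      omega

-- ===== VERDICT (by name: the statement is the Claim_ definition above) =====
theorem raise_to_spec : Claim_equal_raise_to := by
  intro num max_degree _ hpre
  unfold Spec_raise_to raise_to raise_to_alt
  have hE : ∃ n, num ^ n > 100 ^ 20 := ⟨134, pow134_big num hpre⟩
  have hs : num ^ (Nat.find hE) > 100 ^ 20 := Nat.find_spec hE
  have hmin : ∀ m, m < Nat.find hE → ¬ num ^ m > 100 ^ 20 := fun m hm => Nat.find_min hE hm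
  have hsle : Nat.find hE ≤ 134 := Nat.find_min' hE (pow134_big num hpre)
  rw [raiseToGoA_eq num (Nat.find hE) hs hmin 200 0 (by omega) (by omega),
      findStopB_eq num (Nat.find hE) hs hmin 200 0 (by omega) (by omega)]
  simp
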